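-- pv_equiv track=rewrite | github.com/hero-elio/EvoAgentX | evoagentx/tools/research_tools/text_match.py | build_text_ngram_sets
-- ===== SOURCE A (Python) =====
-- from typing import List, Tuple
--
-- def build_text_ngram_sets(text_tokens: List[str], max_len: int) -> List[set]:
--     # returns ngram_sets[L] = set of tuple ngrams of length L (1..max_len), index 0 is unused
--     n = len(text_tokens)
--     ngram_sets = [set() for _ in range(max_len + 1)]
--     for L in range(1, max_len + 1):
--         if n < L:
--             continue
--         for i in range(0, n - L + 1):
--             ngram_sets[L].add(tuple(text_tokens[i:i+L]))
--     return ngram_sets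
-- ===== SOURCE B (Python) =====
-- from typing import List
--
-- def build_text_ngram_sets(text_tokens: List[str], max_len: int) -> List[set]:
--     # position-major: extend each n-gram incrementally instead of re-slicing per length
--     n = len(text_tokens)
--     ngram_sets = [set() for _ in range(max_len + 1)]
--     for i in range(n):
--         cur = ()
--         for L in range(1, max_len + 1):
--             if i + L > n:
--                 break
--             cur = cur + (text_tokens[i + L - 1],)
--             ngram_sets[L].add(cur)
--     return ngram_sets
-- ===== Notes on version B (the rewrite author's own statement) =====
-- stated objective: alternative
-- what changed: B inverts the loop nesting: instead of length-major passes that re-slice text_tokens[i:i+L] for each L, B walks start positions and extends each n-gram incrementally (cur = cur + (tok,)), adding cur to ngram_sets[L] as it grows.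
import Mathlib
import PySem

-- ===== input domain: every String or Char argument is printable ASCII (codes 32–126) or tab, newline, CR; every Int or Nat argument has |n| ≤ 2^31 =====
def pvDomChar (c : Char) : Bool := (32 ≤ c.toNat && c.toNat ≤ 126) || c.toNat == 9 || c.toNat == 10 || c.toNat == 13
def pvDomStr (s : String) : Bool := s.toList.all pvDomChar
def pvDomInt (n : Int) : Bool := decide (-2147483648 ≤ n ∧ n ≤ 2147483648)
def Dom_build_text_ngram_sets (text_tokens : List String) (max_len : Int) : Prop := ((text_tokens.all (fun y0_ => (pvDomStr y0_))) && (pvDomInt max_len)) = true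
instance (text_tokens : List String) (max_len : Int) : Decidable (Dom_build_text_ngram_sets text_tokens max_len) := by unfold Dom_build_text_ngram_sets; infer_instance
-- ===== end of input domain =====

-- B builds the same n-gram sets position-major, extending each n-gram incrementally instead of re-slicing per length (alternative decomposition; same cost).


-- ===== PORT A =====
-- length-major: for each L in 1..max_len, slice every L-gram and add it to ngram_sets[L]
def build_text_ngram_sets (text_tokens : List String) (max_len : Int) : List (List (List String)) :=
  (PySem.List.pyRange 1 (max_len + 1) 1).foldl
    (fun acc L =>
      if (text_tokens.length : Int) < L then acc
      else
        (PySem.List.pyRange 0 ((text_tokens.length : Int) - L + 1) 1).foldl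
          (fun acc2 i =>
            acc2.set L.toNat
              (PySem.Set.add (acc2.getD L.toNat [])
                (PySem.List.slice text_tokens (some i) (some (i + L)))))
          acc)
    ((PySem.List.pyRange 0 (max_len + 1) 1).map (fun _ => ([] : List (List String))))

-- ===== PORT B =====
-- inner 'for L in range(1, max_len+1): if i+L > n: break; …' loop, structural recursion over the L-range
def bInner (text_tokens : List String) (n i : Int) :
    List Int → List String → List (List (List String)) → List (List (List String))
  | [], _, acc => acc
  | L :: rest, cur, acc =>
    if i + L > n then acc    -- break
    else
      -- index i+L-1 is always in range here, so getD's default is never used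
      let cur' := cur ++ [(PySem.List.pyGet? text_tokens (i + L - 1)).getD ""]
      bInner text_tokens n i rest cur'
        (acc.set L.toNat (PySem.Set.add (acc.getD L.toNat []) cur'))

def build_text_ngram_sets_alt (text_tokens : List String) (max_len : Int) : List (List (List String)) :=
  (PySem.List.pyRange 0 (text_tokens.length : Int) 1).foldl
    (fun acc i => bInner text_tokens (text_tokens.length : Int) i
      (PySem.List.pyRange 1 (max_len + 1) 1) [] acc)
    ((PySem.List.pyRange 0 (max_len + 1) 1).map (fun _ => ([] : List (List String))))

-- ===== PRECONDITION & SPEC =====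
def Spec_build_text_ngram_sets (text_tokens : List String) (max_len : Int) (out : List (List (List String))) : Prop := out = build_text_ngram_sets_alt text_tokens max_len
instance (text_tokens : List String) (max_len : Int) (out : List (List (List String))) : Decidable (Spec_build_text_ngram_sets text_tokens max_len out) := by unfold Spec_build_text_ngram_sets; infer_instance

-- ===== CLAIM (what is proved, stated in full; the proofs are below) =====
def Claim_equal_build_text_ngram_sets : Prop := ∀ (text_tokens : List String) (max_len : Int), Dom_build_text_ngram_sets text_tokens max_len → Spec_build_text_ngram_sets text_tokens max_len (build_text_ngram_sets text_tokens max_len)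

-- ===== LEMMAS AND PROOFS =====

-- n-gram of length k starting at position i
def pvNgram (tt : List String) (i k : Nat) : List String := (tt.drop i).take k

-- the set at index k after adding the first cnt starting positions, in order
def pvBset (tt : List String) (k cnt : Nat) : List (List String) :=
  ((List.range cnt).map (fun i => pvNgram tt i k)).foldl PySem.Set.add []

-- A's state after the outer loop has processed L = 1..m
def pvGA (tt : List String) (m k : Nat) : List (List String) :=
  if 1 ≤ k ∧ k ≤ m then pvBset tt k (tt.length + 1 - k) else []

-- B's state after the outer loop has processed i = 0..p-1
def pvGB (tt : List String) (p k : Nat) : List (List String) :=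
  if 1 ≤ k then pvBset tt k (min p (tt.length + 1 - k)) else []

theorem pv_getD_map_range {α : Type} (c k : Nat) (hk : k < c) (g : Nat → α) (d : α) :
    (((List.range c).map g).getD k d) = g k := by
  simp [List.getD_eq_getElem?_getD, hk]

theorem pv_set_map_range {α : Type} (c k : Nat) (g : Nat → α) (v : α) :
    ((List.range c).map g).set k v
      = (List.range c).map (fun j => if j = k then v else g j) := by
  apply List.ext_getElem
  · simp
  · intro i h1 h2
    simp only [List.getElem_set, List.getElem_map, List.getElem_range] at *
    by_cases h : i = k
    · subst h
      have hi : i < c := by simpa using h1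
      simp
    · simp [h, Ne.symm h]

-- a fold that only reads and writes index k is a single set at k
theorem pv_foldl_set {ι : Type} (js : List ι) (f : ι → List String) (k : Nat) :
    ∀ (st : List (List (List String))), k < st.length →
      js.foldl (fun a i => a.set k (PySem.Set.add (a.getD k []) (f i))) st
        = st.set k (js.foldl (fun s i => PySem.Set.add s (f i)) (st.getD k [])) := by
  induction js with
  | nil => intro st hk; simp [List.getD_eq_getElem?_getD, List.getElem?_eq_getElem hk,
      List.set_getElem_self]
  | cons j js ih =>
    intro st hk
    simp only [List.foldl_cons]
    rw [ih _ (by simpa using hk)]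
    simp [List.set_set, List.getD_eq_getElem?_getD, List.getElem?_set_self hk]

-- A's outer loop over L = 1..m
theorem pv_A_loop (tt : List String) (ml : Int) (m : Nat) (hm : (m : Int) ≤ ml) :
    (PySem.List.pyRange 1 ((m : Int) + 1) 1).foldl
      (fun acc L =>
        if (tt.length : Int) < L then acc
        else
          (PySem.List.pyRange 0 ((tt.length : Int) - L + 1) 1).foldl
            (fun acc2 i =>
              acc2.set L.toNat
                (PySem.Set.add (acc2.getD L.toNat [])
                  (PySem.List.slice tt (some i) (some (i + L)))))
            acc)
      ((List.range (ml + 1).toNat).map (fun _ => ([] : List (List String))))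
    = (List.range (ml + 1).toNat).map (pvGA tt m) := by
  induction m with
  | zero =>
    rw [PySem.List.pyRange_one_eq_nil (by omega), List.foldl_nil]
    apply List.map_congr_left
    intro k _
    simp only [pvGA]
    rw [if_neg (by omega)]
  | succ m ih =>
    have hm' : (m : Int) ≤ ml := by push_cast at hm ⊢; omega
    rw [show ((m + 1 : Nat) : Int) + 1 = ((m : Int) + 1) + 1 by push_cast; ring,
        PySem.List.pyRange_one_succ_right (by omega), List.foldl_append, ih hm',
        List.foldl_cons, List.foldl_nil]
    have hc : m + 1 < (ml + 1).toNat := by omega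
    by_cases hn : (tt.length : Int) < (m : Int) + 1
    · rw [if_pos hn]
      apply List.map_congr_left
      intro k hk
      simp only [pvGA]
      by_cases h1 : 1 ≤ k ∧ k ≤ m
      · rw [if_pos h1, if_pos ⟨h1.1, by omega⟩]
      · by_cases h2 : k = m + 1
        · subst h2
          rw [if_neg h1, if_pos ⟨by omega, le_refl _⟩]
          have : tt.length + 1 - (m + 1) = 0 := by omega
          rw [this]
          simp [pvBset]
        · rw [if_neg h1, if_neg (by omega)]
    · rw [if_neg hn]
      have hLnat : ((m : Int) + 1).toNat = m + 1 := by omega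
      have hcnt : (tt.length : Int) - ((m : Int) + 1) + 1 = ((tt.length - m : Nat) : Int) := by
        omega
      rw [hLnat, hcnt, PySem.List.pyRange_zero_nat, List.foldl_map,
          pv_foldl_set _ _ _ _ (by simpa using hc),
          pv_getD_map_range _ _ hc, pv_set_map_range]
      have hsl : ∀ (i : Nat),
          PySem.List.slice tt (some (i : Int)) (some ((i : Int) + ((m : Int) + 1)))
            = pvNgram tt i (m + 1) := by
        intro i
        rw [show (i : Int) + ((m : Int) + 1) = (i : Int) + ((m + 1 : Nat) : Int) by push_cast; ring,
            PySem.List.slice_natCast_add]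
        rfl
      simp only [hsl]
      have hGA : pvGA tt m (m + 1) = [] := by simp [pvGA]
      rw [hGA]
      have hfold : (List.range (tt.length - m)).foldl
            (fun s i => PySem.Set.add s (pvNgram tt i (m + 1))) []
          = pvBset tt (m + 1) (tt.length + 1 - (m + 1)) := by
        rw [pvBset, List.foldl_map, show tt.length + 1 - (m + 1) = tt.length - m by omega]
      rw [hfold]
      apply List.map_congr_left
      intro k hk
      simp only [pvGA]
      by_cases h2 : k = m + 1
      · subst h2; rw [if_pos rfl, if_pos ⟨by omega, le_refl _⟩]
      · rw [if_neg h2]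
        by_cases h1 : 1 ≤ k ∧ k ≤ m
        · rw [if_pos h1, if_pos ⟨h1.1, by omega⟩]
        · rw [if_neg h1, if_neg (by omega)]

-- B's inner loop: starting at length L0+1 with cur = the (L0)-gram at p, it adds
-- the k-gram at p to entry k for every L0+1 ≤ k with p + k ≤ n, and touches nothing else
theorem pv_bInner_spec (tt : List String) (ml : Int) (p : Nat) (_hp : p < tt.length) :
    ∀ (d L0 : Nat) (g : Nat → List (List String)), (ml - (L0 : Int)).toNat = d →
      bInner tt (tt.length : Int) (p : Int) (PySem.List.pyRange ((L0 : Int) + 1) (ml + 1) 1)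
          ((tt.drop p).take L0) ((List.range (ml + 1).toNat).map g)
        = (List.range (ml + 1).toNat).map
            (fun k => if L0 + 1 ≤ k ∧ p + k ≤ tt.length
              then PySem.Set.add (g k) (pvNgram tt p k) else g k) := by
  intro d
  induction d with
  | zero =>
    intro L0 g hd
    rw [PySem.List.pyRange_one_eq_nil (by omega), bInner]
    apply List.map_congr_left
    intro k hk
    rw [if_neg (by simp only [List.mem_range] at hk; omega)]
  | succ d ihd =>
    intro L0 g hd
    by_cases hL : (L0 : Int) + 1 < ml + 1
    · rw [PySem.List.pyRange_one_cons hL]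
      simp only [bInner]
      by_cases hbr : (p : Int) + ((L0 : Int) + 1) > (tt.length : Int)
      · rw [if_pos hbr]
        apply List.map_congr_left
        intro k hk
        rw [if_neg (by simp only [List.mem_range] at hk; omega)]
      · rw [if_neg hbr]
        have hidx : p + L0 < tt.length := by omega
        have hcur : (tt.drop p).take L0
              ++ [(PySem.List.pyGet? tt ((p : Int) + ((L0 : Int) + 1) - 1)).getD ""]
            = (tt.drop p).take (L0 + 1) := by
          rw [show (p : Int) + ((L0 : Int) + 1) - 1 = ((p + L0 : Nat) : Int) by push_cast; ring]
          have hget : PySem.List.pyGet? tt ((p + L0 : Nat) : Int) = some tt[p + L0] := by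
            have h1 : ((p + L0 : Nat) : Int) < (tt.length : Int) := by exact_mod_cast hidx
            simp only [PySem.List.pyGet?, PySem.List.pyIdx?]
            rw [if_pos (by positivity), if_pos h1,
                show ((p + L0 : Nat) : Int).toNat = p + L0 by omega]
            simp [List.getElem?_eq_getElem hidx]
          rw [hget, List.take_add_one]
          have : (tt.drop p)[L0]? = some tt[p + L0] := by
            rw [List.getElem?_drop, List.getElem?_eq_getElem (by omega)]
          rw [this]
          rfl
        have hLnat : ((L0 : Int) + 1).toNat = L0 + 1 := by omega
        have hc : L0 + 1 < (ml + 1).toNat := by omega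
        rw [hcur, hLnat, pv_getD_map_range _ _ hc, pv_set_map_range]
        have harg : ((L0 : Int) + 1) + 1 = ((L0 + 1 : Nat) : Int) + 1 := by push_cast; ring
        rw [harg, ihd (L0 + 1) _ (by omega)]
        apply List.map_congr_left
        intro k hk
        simp only [List.mem_range] at hk
        by_cases h2 : k = L0 + 1
        · subst h2
          rw [if_neg (by omega), if_pos rfl, if_pos ⟨le_refl _, by omega⟩]
          have : pvNgram tt p (L0 + 1) = (tt.drop p).take (L0 + 1) := rfl
          rw [this]
        · by_cases h3 : L0 + 1 + 1 ≤ k ∧ p + k ≤ tt.length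
          · rw [if_pos h3, if_neg h2, if_pos ⟨by omega, h3.2⟩]
          · rw [if_neg h3, if_neg h2, if_neg (by omega)]
    · rw [PySem.List.pyRange_one_eq_nil (by omega), bInner]
      apply List.map_congr_left
      intro k hk
      rw [if_neg (by simp only [List.mem_range] at hk; omega)]

-- B's outer loop over i = 0..p-1
theorem pv_B_loop (tt : List String) (ml : Int) :
    ∀ (p : Nat), p ≤ tt.length →
      (List.range p).foldl
        (fun acc i => bInner tt (tt.length : Int) ((i : Nat) : Int)
          (PySem.List.pyRange 1 (ml + 1) 1) [] acc)
        ((List.range (ml + 1).toNat).map (fun _ => ([] : List (List String))))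
      = (List.range (ml + 1).toNat).map (pvGB tt p) := by
  intro p
  induction p with
  | zero =>
    intro _
    rw [List.range_zero, List.foldl_nil]
    apply List.map_congr_left
    intro k _
    simp only [pvGB]
    by_cases h1 : 1 ≤ k
    · rw [if_pos h1]
      simp [pvBset]
    · rw [if_neg h1]
  | succ p ih =>
    intro hp
    rw [List.range_succ, List.foldl_append, ih (by omega), List.foldl_cons, List.foldl_nil]
    have hspec := pv_bInner_spec tt ml p (by omega) (ml - (0 : Int)).toNat 0 (pvGB tt p) rfl
    simp only [Nat.cast_zero, zero_add, List.take_zero] at hspec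
    rw [hspec]
    apply List.map_congr_left
    intro k hk
    simp only [pvGB]
    by_cases h1 : 1 ≤ k
    · by_cases h2 : p + k ≤ tt.length
      · rw [if_pos ⟨by omega, h2⟩, if_pos h1, if_pos h1]
        have hmin1 : min p (tt.length + 1 - k) = p := by omega
        have hmin2 : min (p + 1) (tt.length + 1 - k) = p + 1 := by omega
        rw [hmin1, hmin2, pvBset, pvBset, List.range_succ, List.map_append,
            List.foldl_append]
        rfl
      · rw [if_neg (by omega), if_pos h1, if_pos h1]
        have : min p (tt.length + 1 - k) = min (p + 1) (tt.length + 1 - k) := by omega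
        rw [this]
    · rw [if_neg (by omega), if_neg h1, if_neg h1]

-- ===== VERDICT (by name: the statement is the Claim_ definition above) =====
theorem build_text_ngram_sets_spec : Claim_equal_build_text_ngram_sets := by
  intro tt ml _
  unfold Spec_build_text_ngram_sets build_text_ngram_sets build_text_ngram_sets_alt
  have hinit : (PySem.List.pyRange 0 (ml + 1) 1).map (fun _ => ([] : List (List String)))
      = (List.range (ml + 1).toNat).map (fun _ => ([] : List (List String))) := by
    rw [PySem.List.pyRange_zero, List.map_map]
    rfl
  rw [hinit]
  have hB : (PySem.List.pyRange 0 (tt.length : Int) 1).foldl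
        (fun acc i => bInner tt (tt.length : Int) i (PySem.List.pyRange 1 (ml + 1) 1) [] acc)
        ((List.range (ml + 1).toNat).map (fun _ => ([] : List (List String))))
      = (List.range (ml + 1).toNat).map (pvGB tt tt.length) := by
    rw [show ((tt.length : Int)) = ((tt.length : Nat) : Int) from rfl,
        PySem.List.pyRange_zero_nat, List.foldl_map]
    exact pv_B_loop tt ml tt.length (le_refl _)
  rw [hB]
  by_cases hml : 0 ≤ ml
  · rw [show ml + 1 = ((ml.toNat : Nat) : Int) + 1 by omega,
        pv_A_loop tt ((ml.toNat : Nat) : Int) ml.toNat (le_refl _)]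
    apply List.map_congr_left
    intro k hk
    simp only [List.mem_range] at hk
    simp only [pvGA, pvGB]
    by_cases h1 : 1 ≤ k
    · rw [if_pos ⟨h1, by omega⟩, if_pos h1,
          show min tt.length (tt.length + 1 - k) = tt.length + 1 - k by omega]
    · rw [if_neg (by omega), if_neg h1]
  · rw [PySem.List.pyRange_one_eq_nil (by omega), List.foldl_nil,
        show (ml + 1).toNat = 0 by omega]
    simp
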